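-- pv_equiv track=rewrite | github.com/Nareeek/Codesignal_tasks | efficientRoadNetwork.py | efficientRoadNetwork
-- ===== SOURCE A (Python) =====
-- def efficientRoadNetwork(n, roads):
--     dist = [[4] * n for x in range(n)]
--
--     for x in range(n):
--         dist[x][x] = 0
--     for x, y in roads:
--         dist[x][y] = 1
--         dist[y][x] = 1
--     for k in range(n):
--         for i in range(n):
--             for j in range(n):
--                 if dist[i][j] > dist[i][k] + dist[k][j]:
--                     dist[i][j] = dist[i][k] + dist[k][j]
--     for i in range(n):
--         for j in range(n):
--             if dist[i][j] >= 3: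
--                 return False
--     return True
-- ===== SOURCE B (Python) =====
-- def efficientRoadNetwork(n, roads):
--     # Bitset adjacency: diameter <= 2 iff every pair is adjacent or shares a neighbor.
--     adj = [0] * n
--     for x, y in roads:
--         adj[x] |= 1 << y
--         adj[y] |= 1 << x
--     for i in range(n):
--         for j in range(i + 1, n):
--             if not (adj[i] >> j) & 1 and adj[i] & adj[j] == 0:
--                 return False
--     return True
-- ===== Notes on version B (the rewrite author's own statement) =====
-- stated objective: faster
-- what changed: Replaces the Floyd-Warshall all-pairs shortest-path computation by bitset adjacency masks: diameter <= 2 iff every pair of vertices is adjacent or their neighbor masks intersect (one AND per pair).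
-- outside the precondition, e.g. on efficientRoadNetwork(2, [(0, -1)]): A returns True, B raises ValueError
import Mathlib
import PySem

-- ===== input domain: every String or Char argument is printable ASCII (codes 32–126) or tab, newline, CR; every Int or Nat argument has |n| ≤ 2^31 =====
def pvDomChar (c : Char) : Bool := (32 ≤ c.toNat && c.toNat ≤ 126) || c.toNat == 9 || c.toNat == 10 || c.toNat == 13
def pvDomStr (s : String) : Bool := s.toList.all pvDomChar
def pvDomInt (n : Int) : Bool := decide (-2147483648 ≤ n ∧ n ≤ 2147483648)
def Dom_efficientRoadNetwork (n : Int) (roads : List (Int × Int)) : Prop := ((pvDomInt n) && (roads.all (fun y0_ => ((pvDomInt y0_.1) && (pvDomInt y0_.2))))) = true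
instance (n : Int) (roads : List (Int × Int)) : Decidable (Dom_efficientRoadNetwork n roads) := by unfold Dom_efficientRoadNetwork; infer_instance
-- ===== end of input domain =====

-- B replaces A's O(n^3) Floyd–Warshall by bitset adjacency masks: diameter ≤ 2 iff every
-- pair of vertices is adjacent or their neighbor masks intersect (one AND per pair).

-- ===== PORT A =====
-- dist[i][j]  (rows are independent fresh lists, so functional update is exact)
def pvGet2 (m : List (List Int)) (i j : Int) : Int :=
  PySem.List.pyGetD (PySem.List.pyGetD m i []) j 0

-- dist[i][j] = v
def pvSet2 (m : List (List Int)) (i j : Int) (v : Int) : List (List Int) :=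
  PySem.List.pySetD m i (PySem.List.pySetD (PySem.List.pyGetD m i []) j v)

-- body of the innermost Floyd–Warshall loop
def pvFWStep (k i : Int) (m : List (List Int)) (j : Int) : List (List Int) :=
  if pvGet2 m i j > pvGet2 m i k + pvGet2 m k j then
    pvSet2 m i j (pvGet2 m i k + pvGet2 m k j)
  else m

def efficientRoadNetwork (n : Int) (roads : List (Int × Int)) : Bool :=
  -- dist = [[4] * n for x in range(n)]
  let dist0 := (PySem.List.pyRange 0 n 1).map (fun _ => List.replicate n.toNat (4 : Int))
  -- for x in range(n): dist[x][x] = 0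
  let dist1 := (PySem.List.pyRange 0 n 1).foldl (fun m x => pvSet2 m x x 0) dist0
  -- for x, y in roads: dist[x][y] = 1; dist[y][x] = 1
  let dist2 := roads.foldl (fun m xy => pvSet2 (pvSet2 m xy.1 xy.2 1) xy.2 xy.1 1) dist1
  -- for k … for i … for j …
  let dist3 := (PySem.List.pyRange 0 n 1).foldl (fun m k =>
      (PySem.List.pyRange 0 n 1).foldl (fun m i =>
        (PySem.List.pyRange 0 n 1).foldl (fun m j => pvFWStep k i m j) m) m) dist2
  -- early-return-False scan = all
  (PySem.List.pyRange 0 n 1).all (fun i => (PySem.List.pyRange 0 n 1).all (fun j =>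
     !(decide (pvGet2 dist3 i j ≥ 3))))

-- ===== PORT B =====
-- adj[x] |= 1 << y   (masks are nonnegative Python ints, modelled as Nat;
--  y.toNat is exact because Pre_ gives 0 ≤ y)
def pvAddEdge (a : List Nat) (x y : Int) : List Nat :=
  PySem.List.pySetD a x (PySem.List.pyGetD a x 0 ||| (1 <<< y.toNat))

def efficientRoadNetwork_alt (n : Int) (roads : List (Int × Int)) : Bool :=
  let adj := roads.foldl (fun a xy => pvAddEdge (pvAddEdge a xy.1 xy.2) xy.2 xy.1)
               (List.replicate n.toNat (0 : Nat))
  (PySem.List.pyRange 0 n 1).all (fun i => (PySem.List.pyRange (i + 1) n 1).all (fun j =>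
     (((PySem.List.pyGetD adj i 0) >>> j.toNat) &&& 1 == 1) ||
     !(PySem.List.pyGetD adj i 0 &&& PySem.List.pyGetD adj j 0 == 0)))

-- ===== PRECONDITION & SPEC =====
-- Pre_ excludes roads with an endpoint outside [0, n): for an endpoint < -n or ≥ n the
-- Python A raises IndexError; for a negative in-range endpoint A silently wraps around
-- (a Python indexing accident) while B's `1 << y` raises ValueError.
def Pre_efficientRoadNetwork (n : Int) (roads : List (Int × Int)) : Prop :=
  ∀ p ∈ roads, 0 ≤ p.1 ∧ p.1 < n ∧ 0 ≤ p.2 ∧ p.2 < n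

instance (n : Int) (roads : List (Int × Int)) : Decidable (Pre_efficientRoadNetwork n roads) := by
  unfold Pre_efficientRoadNetwork; infer_instance

def pvWitness_efficientRoadNetwork : Int × (List (Int × Int)) := (3, [(0, 1), (1, 2)])

def Spec_efficientRoadNetwork (n : Int) (roads : List (Int × Int)) (out : Bool) : Prop := out = efficientRoadNetwork_alt n roads
instance (n : Int) (roads : List (Int × Int)) (out : Bool) : Decidable (Spec_efficientRoadNetwork n roads out) := by unfold Spec_efficientRoadNetwork; infer_instance

-- ===== CLAIM (what is proved, stated in full; the proofs are below) =====
def Claim_equal_efficientRoadNetwork : Prop := ∀ (n : Int) (roads : List (Int × Int)), Dom_efficientRoadNetwork n roads → Pre_efficientRoadNetwork n roads → Spec_efficientRoadNetwork n roads (efficientRoadNetwork n roads)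

-- ===== LEMMAS AND PROOFS =====

-- ---------- Nat-indexed model of the matrix, and list-getD/set basics ----------
def pvVal (m : List (List Int)) (a b : Nat) : Int := (m.getD a []).getD b 0
def pvMset (m : List (List Int)) (a b : Nat) (v : Int) : List (List Int) :=
  m.set a ((m.getD a []).set b v)
def pvShaped (N : Nat) (m : List (List Int)) : Prop :=
  m.length = N ∧ ∀ r ∈ m, r.length = N

def pvStepN (k i j : Nat) (m : List (List Int)) : List (List Int) :=
  if pvVal m i j > pvVal m i k + pvVal m k j then
    pvMset m i j (pvVal m i k + pvVal m k j)
  else m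

def pvInitM (N : Nat) : List (List Int) := List.replicate N (List.replicate N 4)
def pvDiagM (N : Nat) (m : List (List Int)) : List (List Int) :=
  (List.range N).foldl (fun m x => pvMset m x x 0) m
def pvRoadsM (roads : List (Int × Int)) (m : List (List Int)) : List (List Int) :=
  roads.foldl (fun m xy => pvMset (pvMset m xy.1.toNat xy.2.toNat 1) xy.2.toNat xy.1.toNat 1) m
def pvFwM (N : Nat) (m : List (List Int)) : List (List Int) :=
  (List.range N).foldl (fun m k =>
    (List.range N).foldl (fun m i =>
      (List.range N).foldl (fun m j => pvStepN k i j m) m) m) m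

-- graph predicates
def pvAdj (roads : List (Int × Int)) (i j : Int) : Prop := (i, j) ∈ roads ∨ (j, i) ∈ roads
def pvGood (roads : List (Int × Int)) (i j : Int) : Prop :=
  i = j ∨ pvAdj roads i j ∨ ∃ c, pvAdj roads i c ∧ pvAdj roads c j

lemma pvAdj_symm {roads : List (Int × Int)} {i j : Int} (h : pvAdj roads i j) :
    pvAdj roads j i := h.symm

lemma pv_getD_set_self {α : Type} (l : List α) (i : Nat) (x d : α) (h : i < l.length) :
    (l.set i x).getD i d = x := by
  rw [List.getD_eq_getElem?_getD, List.getElem?_set_self (by simpa using h)]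
  simp

lemma pv_getD_set_ne {α : Type} (l : List α) (i j : Nat) (x d : α) (h : i ≠ j) :
    (l.set i x).getD j d = l.getD j d := by
  rw [List.getD_eq_getElem?_getD, List.getElem?_set_ne h, ← List.getD_eq_getElem?_getD]

lemma pv_getD_mem {α : Type} (l : List α) (i : Nat) (d : α) (h : i < l.length) :
    l.getD i d ∈ l := by
  rw [List.getD_eq_getElem?_getD, List.getElem?_eq_getElem h]
  simp [List.getElem_mem]

lemma pvVal_mset {N : Nat} {m : List (List Int)} (hm : pvShaped N m)
    {a b : Nat} (ha : a < N) (hb : b < N) (v : Int) (a' b' : Nat) :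
    pvVal (pvMset m a b v) a' b' = if a' = a ∧ b' = b then v else pvVal m a' b' := by
  obtain ⟨hlen, hrows⟩ := hm
  have ham : a < m.length := by omega
  have hrow : (m.getD a []).length = N := hrows _ (pv_getD_mem m a [] ham)
  unfold pvVal pvMset
  by_cases h1 : a' = a
  · subst h1
    rw [pv_getD_set_self m a' _ [] ham]
    by_cases h2 : b' = b
    · subst h2
      rw [pv_getD_set_self _ b' _ 0 (by omega), if_pos ⟨rfl, rfl⟩]
    · rw [pv_getD_set_ne _ b b' _ 0 (by omega : b ≠ b'), if_neg (by tauto)]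
  · rw [pv_getD_set_ne m a a' _ [] (by omega : a ≠ a'), if_neg (by tauto)]

lemma pvShaped_mset {N : Nat} {m : List (List Int)} (hm : pvShaped N m)
    (a b : Nat) (v : Int) : pvShaped N (pvMset m a b v) := by
  obtain ⟨hlen, hrows⟩ := hm
  refine ⟨by simp [pvMset, hlen], ?_⟩
  intro r hr
  by_cases ham : a < m.length
  · rcases List.mem_or_eq_of_mem_set hr with h | h
    · exact hrows _ h
    · subst h
      simp only [List.length_set]
      exact hrows _ (pv_getD_mem m a [] ham)
  · rw [pvMset, List.set_eq_of_length_le (by omega)] at hr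
    exact hrows _ hr

-- ---------- cast bridges between the ports' Int indexing and the Nat model ----------
lemma pvGet2_cast (m : List (List Int)) (a b : Nat) :
    pvGet2 m (a : Int) (b : Int) = pvVal m a b := by
  simp [pvGet2, pvVal, PySem.List.pyGetD_natCast]

lemma pvSet2_cast (m : List (List Int)) (a b : Nat) (v : Int) :
    pvSet2 m (a : Int) (b : Int) v = pvMset m a b v := by
  simp [pvSet2, pvMset, PySem.List.pySetD_natCast, PySem.List.pyGetD_natCast]

lemma pvSet2_nonneg (m : List (List Int)) (x y : Int) (v : Int) (hx : 0 ≤ x) (hy : 0 ≤ y) :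
    pvSet2 m x y v = pvMset m x.toNat y.toNat v := by
  rw [← pvSet2_cast, Int.toNat_of_nonneg hx, Int.toNat_of_nonneg hy]

lemma pvFWStep_cast (k i j : Nat) (m : List (List Int)) :
    pvFWStep (k : Int) (i : Int) m (j : Int) = pvStepN k i j m := by
  simp only [pvFWStep, pvStepN, pvGet2_cast, pvSet2_cast]

lemma pv_foldl_pyRange_cast {α : Type} (f : α → Int → α) (init : α) (n : Int) :
    (PySem.List.pyRange 0 n 1).foldl f init
      = (List.range n.toNat).foldl (fun s (k : Nat) => f s (k : Int)) init := by
  rw [PySem.List.pyRange_one, List.foldl_map]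
  simp only [Int.zero_add, Int.sub_zero]

lemma pv_all_pyRange_cast (p : Int → Bool) (n : Int) :
    (PySem.List.pyRange 0 n 1).all p = (List.range n.toNat).all (fun (k : Nat) => p (k : Int)) := by
  rw [PySem.List.pyRange_one, List.all_map]
  simp only [Function.comp_def, Int.zero_add, Int.sub_zero]

-- ---------- generic fold lemmas ----------
lemma pv_foldl_inv {α : Type} {P : List (List Int) → Prop}
    {step : List (List Int) → α → List (List Int)} :
    ∀ (L : List α) (m : List (List Int)),
      (∀ m x, x ∈ L → P m → P (step m x)) → P m → P (L.foldl step m) := by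
  intro L
  induction L with
  | nil => intro m _ hm; exact hm
  | cons x L' IH =>
      intro m hstep hm
      exact IH _ (fun m y hy => hstep m y (List.mem_cons_of_mem _ hy))
        (hstep m x List.mem_cons_self hm)

lemma pv_foldl_le {α : Type} {N : Nat} (L : List α)
    (step : List (List Int) → α → List (List Int))
    (hsh : ∀ m x, x ∈ L → pvShaped N m → pvShaped N (step m x))
    (hle : ∀ m x, x ∈ L → pvShaped N m → ∀ a b, pvVal (step m x) a b ≤ pvVal m a b) :
    ∀ m, pvShaped N m →
      pvShaped N (L.foldl step m) ∧ ∀ a b, pvVal (L.foldl step m) a b ≤ pvVal m a b := by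
  induction L with
  | nil => intro m hm; exact ⟨hm, fun a b => le_refl _⟩
  | cons x L' IH =>
      intro m hm
      have h1 : pvShaped N (step m x) := hsh m x List.mem_cons_self hm
      obtain ⟨h2, h3⟩ := IH (fun m y hy => hsh m y (List.mem_cons_of_mem _ hy))
        (fun m y hy => hle m y (List.mem_cons_of_mem _ hy)) (step m x) h1
      exact ⟨h2, fun a b => le_trans (h3 a b) (hle m x List.mem_cons_self hm a b)⟩

-- ---------- stage characterizations ----------
lemma pvShaped_init (N : Nat) : pvShaped N (pvInitM N) := by
  constructor
  · simp [pvInitM]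
  · intro r hr
    rw [List.eq_of_mem_replicate hr]
    simp

lemma pvVal_init {N : Nat} {a b : Nat} (ha : a < N) (hb : b < N) :
    pvVal (pvInitM N) a b = 4 := by
  unfold pvVal pvInitM
  simp [List.getD_eq_getElem?_getD, ha, hb]

lemma pvDiag_char {N : Nat} (L : List Nat) (hL : ∀ x ∈ L, x < N) :
    ∀ m, pvShaped N m →
      pvShaped N (L.foldl (fun m x => pvMset m x x 0) m) ∧
      ∀ a b, a < N → b < N →
        ((a = b ∧ a ∈ L → pvVal (L.foldl (fun m x => pvMset m x x 0) m) a b = 0) ∧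
         (¬(a = b ∧ a ∈ L) → pvVal (L.foldl (fun m x => pvMset m x x 0) m) a b = pvVal m a b)) := by
  induction L with
  | nil => intro m hm; exact ⟨hm, by simp⟩
  | cons x L' IH =>
      intro m hm
      simp only [List.foldl_cons]
      have hx : x < N := hL x List.mem_cons_self
      have hm1 : pvShaped N (pvMset m x x 0) := pvShaped_mset hm x x 0
      obtain ⟨hsh, hval⟩ := IH (fun y hy => hL y (List.mem_cons_of_mem _ hy)) _ hm1
      refine ⟨hsh, fun a b ha hb => ⟨?_, ?_⟩⟩
      · rintro ⟨rfl, hmem⟩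
        rcases List.mem_cons.mp hmem with rfl | hmem'
        · by_cases h' : a ∈ L'
          · exact (hval a a ha hb).1 ⟨rfl, h'⟩
          · rw [(hval a a ha hb).2 (by tauto), pvVal_mset hm hx hx 0, if_pos ⟨rfl, rfl⟩]
        · exact (hval a a ha hb).1 ⟨rfl, hmem'⟩
      · intro hna
        have h1 : ¬(a = b ∧ a ∈ L') := fun ⟨h, hmem⟩ => hna ⟨h, List.mem_cons_of_mem _ hmem⟩
        rw [(hval a b ha hb).2 h1, pvVal_mset hm hx hx 0]
        rw [if_neg (by rintro ⟨rfl, rfl⟩; exact hna ⟨rfl, List.mem_cons_self⟩)]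

lemma pvRoads_char {N : Nat} (rs : List (Int × Int))
    (hpre : ∀ p ∈ rs, 0 ≤ p.1 ∧ p.1 < (N : Int) ∧ 0 ≤ p.2 ∧ p.2 < (N : Int)) :
    ∀ m, pvShaped N m →
      pvShaped N (pvRoadsM rs m) ∧
      ∀ a b, a < N → b < N →
        ((pvAdj rs (a : Int) (b : Int) → pvVal (pvRoadsM rs m) a b = 1) ∧
         (¬ pvAdj rs (a : Int) (b : Int) → pvVal (pvRoadsM rs m) a b = pvVal m a b)) := by
  induction rs with
  | nil =>
      intro m hm
      refine ⟨hm, fun a b _ _ => ⟨?_, fun _ => rfl⟩⟩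
      rintro (h | h) <;> simp at h
  | cons r rs' IH =>
      intro m hm
      rw [show pvRoadsM (r :: rs') m
            = pvRoadsM rs' (pvMset (pvMset m r.1.toNat r.2.toNat 1) r.2.toNat r.1.toNat 1) from rfl]
      obtain ⟨hx0, hxN, hy0, hyN⟩ := hpre r List.mem_cons_self
      have hxlt : r.1.toNat < N := by omega
      have hylt : r.2.toNat < N := by omega
      have hm1 : pvShaped N (pvMset m r.1.toNat r.2.toNat 1) := pvShaped_mset hm _ _ 1
      have hm2 : pvShaped N (pvMset (pvMset m r.1.toNat r.2.toNat 1) r.2.toNat r.1.toNat 1) :=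
        pvShaped_mset hm1 _ _ 1
      obtain ⟨hsh, hval⟩ := IH (fun p hp => hpre p (List.mem_cons_of_mem _ hp)) _ hm2
      refine ⟨hsh, fun a b ha hb => ⟨?_, ?_⟩⟩
      · intro hadj
        by_cases h' : pvAdj rs' (a : Int) (b : Int)
        · exact (hval a b ha hb).1 h'
        · rw [(hval a b ha hb).2 h']
          -- the edge r itself must match (a, b)
          have hr : ((a : Int), (b : Int)) = r ∨ ((b : Int), (a : Int)) = r := by
            rcases hadj with h | h
            · rcases List.mem_cons.mp h with h | h
              · exact Or.inl h
              · exact absurd (Or.inl h) h'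
            · rcases List.mem_cons.mp h with h | h
              · exact Or.inr h
              · exact absurd (Or.inr h) h'
          rw [pvVal_mset hm1 hylt hxlt 1, pvVal_mset hm hxlt hylt 1]
          rcases hr with h | h
          · have ha' : (a : Int) = r.1 := by rw [← h]
            have hb' : (b : Int) = r.2 := by rw [← h]
            have : a = r.1.toNat := by omega
            have : b = r.2.toNat := by omega
            by_cases hd : a = r.2.toNat ∧ b = r.1.toNat
            · rw [if_pos hd]
            · rw [if_neg hd, if_pos (by omega)]
          · have ha' : (b : Int) = r.1 := by rw [← h]
            have hb' : (a : Int) = r.2 := by rw [← h]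
            rw [if_pos ⟨by omega, by omega⟩]
      · intro hnadj
        have h' : ¬ pvAdj rs' (a : Int) (b : Int) := by
          intro h; exact hnadj (h.imp (List.mem_cons_of_mem _) (List.mem_cons_of_mem _))
        rw [(hval a b ha hb).2 h', pvVal_mset hm1 hylt hxlt 1, pvVal_mset hm hxlt hylt 1]
        rw [if_neg, if_neg]
        · rintro ⟨rfl, rfl⟩
          exact hnadj (Or.inl (by rw [Int.toNat_of_nonneg hx0, Int.toNat_of_nonneg hy0]; exact List.mem_cons_self))
        · rintro ⟨rfl, rfl⟩
          exact hnadj (Or.inr (by rw [Int.toNat_of_nonneg hx0, Int.toNat_of_nonneg hy0]; exact List.mem_cons_self))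

-- ---------- Floyd–Warshall step lemmas ----------
lemma pvStepN_shaped {N : Nat} {m : List (List Int)} (hm : pvShaped N m)
    (k i j : Nat) : pvShaped N (pvStepN k i j m) := by
  unfold pvStepN; split
  · exact pvShaped_mset hm _ _ _
  · exact hm

lemma pvStepN_le {N : Nat} {m : List (List Int)} (hm : pvShaped N m)
    {k i j : Nat} (hi : i < N) (hj : j < N) (a b : Nat) :
    pvVal (pvStepN k i j m) a b ≤ pvVal m a b := by
  unfold pvStepN; split
  · rename_i hgt
    rw [pvVal_mset hm hi hj _ a b]
    split
    · rename_i h; obtain ⟨rfl, rfl⟩ := h; omega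
    · exact le_refl _
  · exact le_refl _

lemma pvStepN_bound {N : Nat} {m : List (List Int)} (hm : pvShaped N m)
    {k i j : Nat} (hi : i < N) (hj : j < N) :
    pvVal (pvStepN k i j m) i j ≤ pvVal m i k + pvVal m k j := by
  unfold pvStepN; split
  · rw [pvVal_mset hm hi hj _ i j, if_pos ⟨rfl, rfl⟩]
  · omega

-- mono + shape through the three nested folds
lemma pvInner_le {N : Nat} (k i : Nat) (hi : i < N) (L : List Nat) (hL : ∀ x ∈ L, x < N) :
    ∀ m, pvShaped N m →
      pvShaped N (L.foldl (fun m j => pvStepN k i j m) m) ∧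
      ∀ a b, pvVal (L.foldl (fun m j => pvStepN k i j m) m) a b ≤ pvVal m a b :=
  pv_foldl_le L _ (fun m' x _ hm => pvStepN_shaped hm k i x)
    (fun m' x hx hm a b => pvStepN_le hm hi (hL x hx) a b)

lemma pvMiddle_le {N : Nat} (k : Nat) (L : List Nat) (hL : ∀ x ∈ L, x < N) :
    ∀ m, pvShaped N m →
      pvShaped N (L.foldl (fun m i => (List.range N).foldl (fun m j => pvStepN k i j m) m) m) ∧
      ∀ a b, pvVal (L.foldl (fun m i => (List.range N).foldl (fun m j => pvStepN k i j m) m) m) a b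
        ≤ pvVal m a b :=
  pv_foldl_le L _
    (fun m x hx hm => (pvInner_le k x (hL x hx) _ (by simp) m hm).1)
    (fun m x hx hm a b => (pvInner_le k x (hL x hx) _ (by simp) m hm).2 a b)

lemma pvOuter_le {N : Nat} (L : List Nat) :
    ∀ m, pvShaped N m →
      pvShaped N (L.foldl (fun m k => (List.range N).foldl
        (fun m i => (List.range N).foldl (fun m j => pvStepN k i j m) m) m) m) ∧
      ∀ a b, pvVal (L.foldl (fun m k => (List.range N).foldl
        (fun m i => (List.range N).foldl (fun m j => pvStepN k i j m) m) m) m) a b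
        ≤ pvVal m a b :=
  pv_foldl_le L _
    (fun m x _ hm => (pvMiddle_le x _ (by simp) m hm).1)
    (fun m x _ hm a b => (pvMiddle_le x _ (by simp) m hm).2 a b)

-- the key completeness bound: after the outer iteration for k, dist i j ≤ dist i k + dist k j
lemma pvInner_bound {N : Nat} (k i : Nat) (_hk : k < N) (hi : i < N)
    (L : List Nat) (hL : ∀ x ∈ L, x < N) (j : Nat) (hj : j ∈ L) :
    ∀ m, pvShaped N m →
      pvVal (L.foldl (fun m j => pvStepN k i j m) m) i j ≤ pvVal m i k + pvVal m k j := by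
  induction L with
  | nil => cases hj
  | cons x L' IH =>
      intro m hm
      have hx : x < N := hL x List.mem_cons_self
      have hm1 : pvShaped N (pvStepN k i x m) := pvStepN_shaped hm k i x
      by_cases hjx : j ∈ L'
      · calc pvVal (L'.foldl (fun m j => pvStepN k i j m) (pvStepN k i x m)) i j
            ≤ pvVal (pvStepN k i x m) i k + pvVal (pvStepN k i x m) k j :=
              IH (fun y hy => hL y (List.mem_cons_of_mem _ hy)) hjx _ hm1
          _ ≤ pvVal m i k + pvVal m k j := by
              have h1 := @pvStepN_le N m hm k i x hi hx i k
              have h2 := @pvStepN_le N m hm k i x hi hx k j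
              omega
      · have hjx' : j = x := by rcases List.mem_cons.mp hj with h | h; exact h; exact absurd h hjx
        subst hjx'
        calc pvVal (L'.foldl (fun m j => pvStepN k i j m) (pvStepN k i j m)) i j
            ≤ pvVal (pvStepN k i j m) i j :=
              (pvInner_le k i hi L' (fun y hy => hL y (List.mem_cons_of_mem _ hy)) _ hm1).2 i j
          _ ≤ pvVal m i k + pvVal m k j := pvStepN_bound hm hi (hL j List.mem_cons_self)

lemma pvMiddle_bound {N : Nat} (k : Nat) (hk : k < N) (L : List Nat) (hL : ∀ x ∈ L, x < N)
    (i j : Nat) (hiL : i ∈ L) (hj : j < N) :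
    ∀ m, pvShaped N m →
      pvVal (L.foldl (fun m i => (List.range N).foldl (fun m j => pvStepN k i j m) m) m) i j
        ≤ pvVal m i k + pvVal m k j := by
  induction L with
  | nil => cases hiL
  | cons x L' IH =>
      intro m hm
      simp only [List.foldl_cons]
      have hx : x < N := hL x List.mem_cons_self
      have hm1 : pvShaped N ((List.range N).foldl (fun m j => pvStepN k x j m) m) :=
        (pvInner_le k x hx (List.range N) (by simp) m hm).1
      by_cases hiL' : i ∈ L'
      · calc pvVal (L'.foldl _ _) i j
            ≤ pvVal ((List.range N).foldl (fun m j => pvStepN k x j m) m) i k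
              + pvVal ((List.range N).foldl (fun m j => pvStepN k x j m) m) k j :=
              IH (fun y hy => hL y (List.mem_cons_of_mem _ hy)) hiL' _ hm1
          _ ≤ pvVal m i k + pvVal m k j := by
              have h1 := (pvInner_le k x hx (List.range N) (by simp) m hm).2 i k
              have h2 := (pvInner_le k x hx (List.range N) (by simp) m hm).2 k j
              omega
      · have hix : i = x := by rcases List.mem_cons.mp hiL with h | h; exact h; exact absurd h hiL'
        subst hix
        calc pvVal (L'.foldl _ _) i j
            ≤ pvVal ((List.range N).foldl (fun m j => pvStepN k i j m) m) i j :=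
              (pvMiddle_le k L' (fun y hy => hL y (List.mem_cons_of_mem _ hy)) _ hm1).2 i j
          _ ≤ pvVal m i k + pvVal m k j :=
              pvInner_bound k i hk (hL i List.mem_cons_self) (List.range N) (by simp) j
                (List.mem_range.mpr hj) m hm

lemma pvOuter_bound {N : Nat} (L : List Nat) (hL : ∀ x ∈ L, x < N) (k i j : Nat)
    (hkL : k ∈ L) (hi : i < N) (hj : j < N) :
    ∀ m, pvShaped N m →
      pvVal (L.foldl (fun m k => (List.range N).foldl
        (fun m i => (List.range N).foldl (fun m j => pvStepN k i j m) m) m) m) i j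
        ≤ pvVal m i k + pvVal m k j := by
  induction L with
  | nil => cases hkL
  | cons x L' IH =>
      intro m hm
      simp only [List.foldl_cons]
      have hx : x < N := hL x List.mem_cons_self
      have hm1 : pvShaped N ((List.range N).foldl
          (fun m i => (List.range N).foldl (fun m j => pvStepN x i j m) m) m) :=
        (pvMiddle_le x (List.range N) (by simp) m hm).1
      by_cases hkL' : k ∈ L'
      · calc pvVal (L'.foldl _ _) i j
            ≤ pvVal ((List.range N).foldl
                (fun m i => (List.range N).foldl (fun m j => pvStepN x i j m) m) m) i k
              + pvVal ((List.range N).foldl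
                (fun m i => (List.range N).foldl (fun m j => pvStepN x i j m) m) m) k j :=
              IH (fun y hy => hL y (List.mem_cons_of_mem _ hy)) hkL' _ hm1
          _ ≤ pvVal m i k + pvVal m k j := by
              have h1 := (pvMiddle_le x (List.range N) (by simp) m hm).2 i k
              have h2 := (pvMiddle_le x (List.range N) (by simp) m hm).2 k j
              omega
      · have hkx : k = x := by rcases List.mem_cons.mp hkL with h | h; exact h; exact absurd h hkL'
        subst hkx
        calc pvVal (L'.foldl _ _) i j
            ≤ pvVal ((List.range N).foldl
                (fun m i => (List.range N).foldl (fun m j => pvStepN k i j m) m) m) i j :=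
              (pvOuter_le L' _ hm1).2 i j
          _ ≤ pvVal m i k + pvVal m k j :=
              pvMiddle_bound k (hL k List.mem_cons_self) (List.range N) (by simp) i j
                (List.mem_range.mpr hi) hj m hm

-- ---------- the soundness invariant ----------
def pvInv (N : Nat) (roads : List (Int × Int)) (m : List (List Int)) : Prop :=
  pvShaped N m ∧ ∀ a b : Nat, a < N → b < N →
    0 ≤ pvVal m a b ∧
    (pvVal m a b = 0 → a = b) ∧
    (pvVal m a b = 1 → pvAdj roads (a : Int) (b : Int)) ∧
    (pvVal m a b = 2 → ∃ c, pvAdj roads (a : Int) c ∧ pvAdj roads c (b : Int))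

lemma pvInv_stepN {N : Nat} {roads : List (Int × Int)} {m : List (List Int)}
    {k i j : Nat} (hk : k < N) (hi : i < N) (hj : j < N) (h : pvInv N roads m) :
    pvInv N roads (pvStepN k i j m) := by
  obtain ⟨hsh, hP⟩ := h
  refine ⟨pvStepN_shaped hsh k i j, ?_⟩
  intro a b ha hb
  unfold pvStepN
  split
  · rename_i hgt
    rw [pvVal_mset hsh hi hj _ a b]
    split
    · rename_i hab
      obtain ⟨rfl, rfl⟩ := hab
      obtain ⟨h10, h1z, h1o, h1t⟩ := hP a k ha hk
      obtain ⟨h20, h2z, h2o, h2t⟩ := hP k b hk hb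
      refine ⟨by omega, ?_, ?_, ?_⟩
      · intro h0
        have : pvVal m a k = 0 ∧ pvVal m k b = 0 := by omega
        have e1 := h1z this.1; have e2 := h2z this.2
        omega
      · intro h1
        have : (pvVal m a k = 0 ∧ pvVal m k b = 1) ∨ (pvVal m a k = 1 ∧ pvVal m k b = 0) := by
          omega
        rcases this with ⟨e1, e2⟩ | ⟨e1, e2⟩
        · have hak := h1z e1; subst hak; exact h2o e2
        · have hkb := h2z e2; subst hkb; exact h1o e1
      · intro h2
        have : (pvVal m a k = 0 ∧ pvVal m k b = 2) ∨ (pvVal m a k = 1 ∧ pvVal m k b = 1) ∨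
            (pvVal m a k = 2 ∧ pvVal m k b = 0) := by omega
        rcases this with ⟨e1, e2⟩ | ⟨e1, e2⟩ | ⟨e1, e2⟩
        · have hak := h1z e1; subst hak; exact h2t e2
        · exact ⟨(k : Int), h1o e1, h2o e2⟩
        · have hkb := h2z e2; subst hkb; exact h1t e1
    · exact hP a b ha hb
  · exact hP a b ha hb

lemma pvInv_fwM {N : Nat} {roads : List (Int × Int)} {m : List (List Int)}
    (h : pvInv N roads m) : pvInv N roads (pvFwM N m) := by
  unfold pvFwM
  refine pv_foldl_inv _ _ (fun m k hkmem hm => ?_) h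
  refine pv_foldl_inv _ _ (fun m i himem hm => ?_) hm
  refine pv_foldl_inv _ _ (fun m j hjmem hm => ?_) hm
  exact pvInv_stepN (List.mem_range.mp hkmem) (List.mem_range.mp himem)
    (List.mem_range.mp hjmem) hm

-- ---------- the matrix after the initialisation stages ----------
def pvDist2 (N : Nat) (roads : List (Int × Int)) : List (List Int) :=
  pvRoadsM roads (pvDiagM N (pvInitM N))

lemma pvDist2_facts {N : Nat} {roads : List (Int × Int)}
    (hpre : ∀ p ∈ roads, 0 ≤ p.1 ∧ p.1 < (N : Int) ∧ 0 ≤ p.2 ∧ p.2 < (N : Int))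
    {a b : Nat} (ha : a < N) (hb : b < N) :
    pvShaped N (pvDist2 N roads) ∧
    (pvAdj roads (a : Int) (b : Int) → pvVal (pvDist2 N roads) a b = 1) ∧
    (¬ pvAdj roads (a : Int) (b : Int) → a = b → pvVal (pvDist2 N roads) a b = 0) ∧
    (¬ pvAdj roads (a : Int) (b : Int) → a ≠ b → pvVal (pvDist2 N roads) a b = 4) := by
  simp only [pvDist2, pvDiagM]
  have hd := pvDiag_char (N := N) (List.range N) (by simp) _ (pvShaped_init N)
  have hr := pvRoads_char roads hpre _ hd.1
  refine ⟨hr.1, fun h => (hr.2 a b ha hb).1 h, fun h heq => ?_, fun h hne => ?_⟩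
  · rw [(hr.2 a b ha hb).2 h, (hd.2 a b ha hb).1 ⟨heq, List.mem_range.mpr ha⟩]
  · rw [(hr.2 a b ha hb).2 h, (hd.2 a b ha hb).2 (by
      rintro ⟨rfl, _⟩; exact hne rfl), pvVal_init ha hb]

lemma pvDist2_shaped {N : Nat} {roads : List (Int × Int)}
    (hpre : ∀ p ∈ roads, 0 ≤ p.1 ∧ p.1 < (N : Int) ∧ 0 ≤ p.2 ∧ p.2 < (N : Int)) :
    pvShaped N (pvDist2 N roads) := by
  simp only [pvDist2, pvDiagM]
  exact (pvRoads_char roads hpre _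
    (pvDiag_char (N := N) (List.range N) (by simp) _ (pvShaped_init N)).1).1

lemma pvInv_dist2 {N : Nat} {roads : List (Int × Int)}
    (hpre : ∀ p ∈ roads, 0 ≤ p.1 ∧ p.1 < (N : Int) ∧ 0 ≤ p.2 ∧ p.2 < (N : Int)) :
    pvInv N roads (pvDist2 N roads) := by
  refine ⟨pvDist2_shaped hpre, ?_⟩
  intro a b ha hb
  obtain ⟨-, hadj, hdiag, hfar⟩ := pvDist2_facts hpre ha hb
  by_cases h : pvAdj roads (a : Int) (b : Int)
  · rw [hadj h]
    exact ⟨by norm_num, by omega, fun _ => h, by intro hx; exact absurd hx (by norm_num)⟩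
  · by_cases he : a = b
    · rw [hdiag h he]
      refine ⟨le_refl _, fun _ => he, by intro hx; exact absurd hx (by norm_num),
        by intro hx; exact absurd hx (by norm_num)⟩
    · rw [hfar h he]
      exact ⟨by norm_num, by omega, by intro hx; exact absurd hx (by norm_num),
        by intro hx; exact absurd hx (by norm_num)⟩

lemma pvFwM_le {N : Nat} (m : List (List Int)) (hm : pvShaped N m) :
    pvShaped N (pvFwM N m) ∧ ∀ a b, pvVal (pvFwM N m) a b ≤ pvVal m a b := by
  simp only [pvFwM]
  exact pvOuter_le (List.range N) m hm

lemma pvFwM_bound {N : Nat} (m : List (List Int)) (hm : pvShaped N m)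
    {t a b : Nat} (ht : t < N) (ha : a < N) (hb : b < N) :
    pvVal (pvFwM N m) a b ≤ pvVal m a t + pvVal m t b := by
  simp only [pvFwM]
  exact pvOuter_bound (List.range N) (by simp) t a b (List.mem_range.mpr ht) ha hb m hm

-- the characterisation of A's final matrix
lemma pvFinal_lt3_iff {N : Nat} {roads : List (Int × Int)}
    (hpre : ∀ p ∈ roads, 0 ≤ p.1 ∧ p.1 < (N : Int) ∧ 0 ≤ p.2 ∧ p.2 < (N : Int))
    {a b : Nat} (ha : a < N) (hb : b < N) :
    pvVal (pvFwM N (pvDist2 N roads)) a b < 3 ↔ pvGood roads (a : Int) (b : Int) := by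
  have hsh2 := pvDist2_shaped hpre
  constructor
  · intro hlt
    obtain ⟨-, hP⟩ := pvInv_fwM (pvInv_dist2 hpre)
    obtain ⟨h0, hz, ho, ht⟩ := hP a b ha hb
    have : pvVal (pvFwM N (pvDist2 N roads)) a b = 0 ∨
        pvVal (pvFwM N (pvDist2 N roads)) a b = 1 ∨
        pvVal (pvFwM N (pvDist2 N roads)) a b = 2 := by omega
    rcases this with h | h | h
    · exact Or.inl (by exact_mod_cast hz h)
    · exact Or.inr (Or.inl (ho h))
    · exact Or.inr (Or.inr (ht h))
  · intro hg
    obtain ⟨-, hadj, hdiag, hfar⟩ := pvDist2_facts hpre ha hb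
    rcases hg with heq | hadj' | ⟨c, h1, h2⟩
    · have he : a = b := by exact_mod_cast heq
      have hle := (pvFwM_le _ hsh2).2 a b
      by_cases h : pvAdj roads (a : Int) (b : Int)
      · have := hadj h; omega
      · have := hdiag h he; omega
    · have := hadj hadj'
      have hle := (pvFwM_le _ hsh2).2 a b
      omega
    · have hc : 0 ≤ c ∧ c < (N : Int) := by
        rcases h1 with hm | hm
        · have := hpre _ hm; exact ⟨this.2.2.1, this.2.2.2⟩
        · have := hpre _ hm; exact ⟨this.1, this.2.1⟩
      have htN : c.toNat < N := by omega
      have hct : (c.toNat : Int) = c := Int.toNat_of_nonneg hc.1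
      obtain ⟨-, hadjA, -, -⟩ := pvDist2_facts hpre ha htN
      obtain ⟨-, hadjB, -, -⟩ := pvDist2_facts hpre htN hb
      have e1 : pvVal (pvDist2 N roads) a c.toNat = 1 := hadjA (by rw [hct]; exact h1)
      have e2 : pvVal (pvDist2 N roads) c.toNat b = 1 := hadjB (by rw [hct]; exact h2)
      have := pvFwM_bound _ hsh2 htN ha hb
      omega

-- ---------- bit-level helpers for B ----------
lemma pv_shl_one_testBit (s t : Nat) : (1 <<< s : Nat).testBit t = decide (t = s) := by
  rw [Nat.shiftLeft_eq, Nat.one_mul, Nat.testBit_two_pow]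
  simp [eq_comm]

lemma pv_shr_and_one (x t : Nat) : (((x >>> t) &&& 1) == 1) = x.testBit t := by
  rw [Nat.testBit, Nat.and_comm]
  rcases Nat.mod_two_eq_zero_or_one (x >>> t) with h | h <;> simp [h]

lemma pv_land_ne_zero (p q : Nat) : p &&& q ≠ 0 ↔ ∃ t, p.testBit t ∧ q.testBit t := by
  constructor
  · intro h
    obtain ⟨t, ht⟩ := Nat.exists_testBit_of_ne_zero h
    rw [Nat.testBit_and] at ht
    exact ⟨t, by simpa using ht⟩
  · rintro ⟨t, h1, h2⟩ h0
    have : (p &&& q).testBit t = false := by rw [h0]; exact Nat.zero_testBit t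
    rw [Nat.testBit_and, h1, h2] at this
    simp at this

lemma pv_map_const {α β : Type} (l : List α) (r : β) :
    l.map (fun _ => r) = List.replicate l.length r := by
  induction l with
  | nil => rfl
  | cons x l IH => simp [IH, List.replicate_succ]

-- ---------- Nat model of B's mask building ----------
def pvAddEdgeN (a : List Nat) (x y : Nat) : List Nat := a.set x (a.getD x 0 ||| (1 <<< y))

def pvMaskM (roads : List (Int × Int)) (a0 : List Nat) : List Nat :=
  roads.foldl (fun a xy => pvAddEdgeN (pvAddEdgeN a xy.1.toNat xy.2.toNat) xy.2.toNat xy.1.toNat) a0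

lemma pvAddEdge_nonneg (a : List Nat) (x y : Int) (hx : 0 ≤ x) :
    pvAddEdge a x y = pvAddEdgeN a x.toNat y.toNat := by
  conv_lhs => rw [pvAddEdge, show x = ((x.toNat : Nat) : Int) from (Int.toNat_of_nonneg hx).symm]
  simp only [PySem.List.pySetD_natCast, PySem.List.pyGetD_natCast]
  rfl

lemma pv_maskfold_eq (roads : List (Int × Int)) (hnn : ∀ p ∈ roads, 0 ≤ p.1 ∧ 0 ≤ p.2)
    (a0 : List Nat) :
    roads.foldl (fun a xy => pvAddEdge (pvAddEdge a xy.1 xy.2) xy.2 xy.1) a0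
      = pvMaskM roads a0 := by
  unfold pvMaskM
  apply PySem.List.foldl_congr_mem
  intro acc xy hxy
  rw [pvAddEdge_nonneg _ _ _ (hnn xy hxy).1, pvAddEdge_nonneg _ _ _ (hnn xy hxy).2]

lemma pvAddEdgeN_length (a : List Nat) (x y : Nat) : (pvAddEdgeN a x y).length = a.length := by
  simp [pvAddEdgeN]

lemma pvAddEdgeN_testBit (a : List Nat) (x y : Nat) (hx : x < a.length) (i t : Nat) :
    ((pvAddEdgeN a x y).getD i 0).testBit t = true ↔
      ((a.getD i 0).testBit t = true ∨ (i = x ∧ t = y)) := by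
  unfold pvAddEdgeN
  by_cases hix : i = x
  · subst hix
    rw [pv_getD_set_self _ _ _ 0 hx]
    simp only [Nat.testBit_or, Bool.or_eq_true, pv_shl_one_testBit, decide_eq_true_eq,
      true_and]
  · rw [pv_getD_set_ne _ _ _ _ 0 (fun h => hix h.symm)]
    simp [hix]

set_option maxHeartbeats 1000000 in
lemma pvMask_testBit {N : Nat} (rs : List (Int × Int))
    (hpre : ∀ p ∈ rs, 0 ≤ p.1 ∧ p.1 < (N : Int) ∧ 0 ≤ p.2 ∧ p.2 < (N : Int)) :
    ∀ a, a.length = N → ∀ i t : Nat, i < N →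
      (((pvMaskM rs a).getD i 0).testBit t = true ↔
        ((a.getD i 0).testBit t = true ∨ pvAdj rs (i : Int) (t : Int))) := by
  induction rs with
  | nil =>
      intro a _ i t _
      simp [pvMaskM, pvAdj]
  | cons r rs' IH =>
      intro a hlen i t hi
      obtain ⟨hx0, hxN, hy0, hyN⟩ := hpre r List.mem_cons_self
      have hx : r.1.toNat < N := by omega
      have hy : r.2.toNat < N := by omega
      have hstep : pvMaskM (r :: rs') a
          = pvMaskM rs' (pvAddEdgeN (pvAddEdgeN a r.1.toNat r.2.toNat) r.2.toNat r.1.toNat) := rfl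
      have hlen1 : (pvAddEdgeN a r.1.toNat r.2.toNat).length = N := by
        rw [pvAddEdgeN_length, hlen]
      have hlen2 : (pvAddEdgeN (pvAddEdgeN a r.1.toNat r.2.toNat) r.2.toNat r.1.toNat).length = N := by
        rw [pvAddEdgeN_length, hlen1]
      rw [hstep, IH (fun p hp => hpre p (List.mem_cons_of_mem _ hp)) _ hlen2 i t hi,
        pvAddEdgeN_testBit (pvAddEdgeN a r.1.toNat r.2.toNat) r.2.toNat r.1.toNat
          (by rw [hlen1]; exact hy) i t,
        pvAddEdgeN_testBit a r.1.toNat r.2.toNat (by rw [hlen]; exact hx) i t]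
      have e1 : ((i : Int), (t : Int)) = r ↔ (i = r.1.toNat ∧ t = r.2.toNat) := by
        rw [Prod.ext_iff]; omega
      have e2 : ((t : Int), (i : Int)) = r ↔ (t = r.1.toNat ∧ i = r.2.toNat) := by
        rw [Prod.ext_iff]; omega
      have e3 : pvAdj (r :: rs') (i : Int) (t : Int) ↔
          (((i : Int), (t : Int)) = r ∨ ((t : Int), (i : Int)) = r ∨ pvAdj rs' (i : Int) (t : Int)) := by
        unfold pvAdj
        simp only [List.mem_cons]
        tauto
      rw [e3, e1, e2]
      tauto

lemma pv_getD_replicate_zero (N i : Nat) : (List.replicate N (0 : Nat)).getD i 0 = 0 := by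
  rw [List.getD_eq_getElem?_getD, List.getElem?_replicate]
  split <;> simp

lemma pvMask_adj {N : Nat} (roads : List (Int × Int))
    (hpre : ∀ p ∈ roads, 0 ≤ p.1 ∧ p.1 < (N : Int) ∧ 0 ≤ p.2 ∧ p.2 < (N : Int))
    (i t : Nat) (hi : i < N) :
    ((pvMaskM roads (List.replicate N 0)).getD i 0).testBit t = true ↔
      pvAdj roads (i : Int) (t : Int) := by
  rw [pvMask_testBit roads hpre _ (by simp) i t hi, pv_getD_replicate_zero]
  simp [Nat.zero_testBit]

-- ---------- relating the ports to the Nat models ----------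
lemma pv_roadsfold_eq (roads : List (Int × Int)) (hnn : ∀ p ∈ roads, 0 ≤ p.1 ∧ 0 ≤ p.2)
    (d : List (List Int)) :
    roads.foldl (fun m xy => pvSet2 (pvSet2 m xy.1 xy.2 1) xy.2 xy.1 1) d
      = pvRoadsM roads d := by
  unfold pvRoadsM
  apply PySem.List.foldl_congr_mem
  intro acc xy hxy
  rw [pvSet2_nonneg _ _ _ _ (hnn xy hxy).1 (hnn xy hxy).2,
    pvSet2_nonneg _ _ _ _ (hnn xy hxy).2 (hnn xy hxy).1]

lemma pv_portA_eq (n : Int) (roads : List (Int × Int))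
    (hnn : ∀ p ∈ roads, 0 ≤ p.1 ∧ 0 ≤ p.2) :
    efficientRoadNetwork n roads
      = (List.range n.toNat).all (fun a => (List.range n.toNat).all (fun b =>
          !(decide (pvVal (pvFwM n.toNat (pvDist2 n.toNat roads)) a b ≥ 3)))) := by
  unfold efficientRoadNetwork
  simp only [pv_foldl_pyRange_cast, pv_all_pyRange_cast, pv_map_const,
    PySem.List.length_pyRange_one, Int.sub_zero, pvSet2_cast, pvFWStep_cast, pvGet2_cast,
    pv_roadsfold_eq roads hnn]
  rfl

lemma pv_portA_iff (n : Int) (roads : List (Int × Int))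
    (hnn : ∀ p ∈ roads, 0 ≤ p.1 ∧ 0 ≤ p.2) :
    efficientRoadNetwork n roads = true ↔
      ∀ a b : Nat, a < n.toNat → b < n.toNat →
        pvVal (pvFwM n.toNat (pvDist2 n.toNat roads)) a b < 3 := by
  rw [pv_portA_eq n roads hnn]
  simp only [List.all_eq_true, List.mem_range, Bool.not_eq_eq_eq_not, Bool.not_true,
    decide_eq_false_iff_not, not_le]
  constructor
  · intro h a b ha hb; exact h a ha b hb
  · intro h a ha b hb; exact h a b ha hb

lemma pv_portB_iff (n : Int) (roads : List (Int × Int))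
    (hnn : ∀ p ∈ roads, 0 ≤ p.1 ∧ 0 ≤ p.2) :
    efficientRoadNetwork_alt n roads = true ↔
      ∀ i j : Nat, i < n.toNat → j < n.toNat → i < j →
        (((pvMaskM roads (List.replicate n.toNat 0)).getD i 0).testBit j = true ∨
         ((pvMaskM roads (List.replicate n.toNat 0)).getD i 0) &&&
           ((pvMaskM roads (List.replicate n.toNat 0)).getD j 0) ≠ 0) := by
  unfold efficientRoadNetwork_alt
  simp only [pv_maskfold_eq roads hnn, pv_all_pyRange_cast, List.all_eq_true, List.mem_range]
  constructor
  · intro h i j hi hj hij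
    have hmem : (j : Int) ∈ PySem.List.pyRange ((i : Int) + 1) n 1 := by
      rw [PySem.List.mem_pyRange_one]; omega
    have := h i hi (j : Int) hmem
    rw [Bool.or_eq_true] at this
    rcases this with hbit | hland
    · left
      rw [PySem.List.pyGetD_natCast] at hbit
      rw [← pv_shr_and_one]
      simpa using hbit
    · right
      simp only [PySem.List.pyGetD_natCast] at hland
      simpa using hland
  · intro h i hi j hj
    rw [PySem.List.mem_pyRange_one] at hj
    have hj0 : 0 ≤ j := by omega
    have hjn : j.toNat < n.toNat := by omega
    have hij : i < j.toNat := by omega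
    have := h i j.toNat hi hjn hij
    rw [Bool.or_eq_true]
    rcases this with hbit | hland
    · left
      rw [PySem.List.pyGetD_natCast, pv_shr_and_one]
      exact hbit
    · right
      rw [show j = ((j.toNat : Nat) : Int) from (Int.toNat_of_nonneg hj0).symm]
      simp only [PySem.List.pyGetD_natCast]
      simpa using hland

-- ---------- the main equivalence ----------
lemma pv_main_iff (n : Int) (roads : List (Int × Int))
    (hpre : Pre_efficientRoadNetwork n roads) :
    efficientRoadNetwork n roads = true ↔ efficientRoadNetwork_alt n roads = true := by
  have hnn : ∀ p ∈ roads, 0 ≤ p.1 ∧ 0 ≤ p.2 := fun p hp =>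
    ⟨(hpre p hp).1, (hpre p hp).2.2.1⟩
  have hpreN : ∀ p ∈ roads, 0 ≤ p.1 ∧ p.1 < (n.toNat : Int) ∧ 0 ≤ p.2 ∧ p.2 < (n.toNat : Int) := by
    intro p hp
    obtain ⟨h1, h2, h3, h4⟩ := hpre p hp
    refine ⟨h1, by omega, h3, by omega⟩
  rw [pv_portA_iff n roads hnn, pv_portB_iff n roads hnn]
  constructor
  · intro h i j hi hj hij
    have hg : pvGood roads (i : Int) (j : Int) :=
      (pvFinal_lt3_iff hpreN hi hj).mp (h i j hi hj)
    rcases hg with heq | hadj | ⟨c, h1, h2⟩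
    · exfalso
      have hij' : i = j := by exact_mod_cast heq
      omega
    · exact Or.inl ((pvMask_adj roads hpreN i j hi).mpr hadj)
    · right
      rw [pv_land_ne_zero]
      have hc : 0 ≤ c ∧ c < ((n.toNat : Nat) : Int) := by
        rcases h1 with hm | hm
        · have := hpreN _ hm; exact ⟨this.2.2.1, this.2.2.2⟩
        · have := hpreN _ hm; exact ⟨this.1, this.2.1⟩
      have hct : (c.toNat : Int) = c := Int.toNat_of_nonneg hc.1
      refine ⟨c.toNat, (pvMask_adj roads hpreN i c.toNat hi).mpr (by rw [hct]; exact h1),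
        (pvMask_adj roads hpreN j c.toNat hj).mpr (by rw [hct]; exact pvAdj_symm h2)⟩
  · intro h a b ha hb
    rw [pvFinal_lt3_iff hpreN ha hb]
    rcases Nat.lt_trichotomy a b with hab | hab | hab
    · rcases h a b ha hb hab with hbit | hland
      · exact Or.inr (Or.inl ((pvMask_adj roads hpreN a b ha).mp hbit))
      · obtain ⟨t, b1, b2⟩ := (pv_land_ne_zero _ _).mp hland
        exact Or.inr (Or.inr ⟨(t : Int), (pvMask_adj roads hpreN a t ha).mp b1,
          pvAdj_symm ((pvMask_adj roads hpreN b t hb).mp b2)⟩)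
    · exact Or.inl (by exact_mod_cast hab)
    · rcases h b a hb ha hab with hbit | hland
      · exact Or.inr (Or.inl (pvAdj_symm ((pvMask_adj roads hpreN b a hb).mp hbit)))
      · obtain ⟨t, b1, b2⟩ := (pv_land_ne_zero _ _).mp hland
        exact Or.inr (Or.inr ⟨(t : Int), (pvMask_adj roads hpreN a t ha).mp b2,
          pvAdj_symm ((pvMask_adj roads hpreN b t hb).mp b1)⟩)

-- ===== VERDICT (by name: the statement is the Claim_ definition above) =====
theorem efficientRoadNetwork_spec : Claim_equal_efficientRoadNetwork := by
  intro n roads _ hpre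
  unfold Spec_efficientRoadNetwork
  have h := pv_main_iff n roads hpre
  cases hA : efficientRoadNetwork n roads <;> cases hB : efficientRoadNetwork_alt n roads
  · rfl
  · rw [hA, hB] at h; simp at h
  · rw [hA, hB] at h; simp at h
  · rfl
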